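-- pv_equiv track=rewrite | github.com/fcarlosmonteiro/testdatageneration | random_test/mutants/uri_2060/dead_mutants/mutant5.py | func
-- ===== SOURCE A (Python) =====
-- def func(item1,item2,item3,item4,item5):
--     x=[item1,item2,item3,item4,item5]
--     m2 = 0
--     m3 = 0
--     m4 = 0
--     m5 = 0
--
--     for y in x:
--         y = int(y)
--         if y % 2 == 0:
--             m2 += 1
--         if y % 3 == 0:
--             m3 += 1
--         if y % 4 == 0:
--             m4 += 1
--         if y % 5 == 0:
--             m5 += 1
--     valor = str(m2) + " Multiplo(s) de 2, "
--     valor += str(m3) + " Multiplo(s) de 3, "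
--     valor += str(m4) + " Multiplo(s) de 4 e "
--     valor += str(m5) + " Multiplo(s) de 5"
--
--     return valor
-- ===== SOURCE B (Python) =====
-- def func(item1, item2, item3, item4, item5):
--     x = [item1, item2, item3, item4, item5]
--     counts = {d: sum(1 for y in x if int(y) % d == 0) for d in (2, 3, 4, 5)}
--     return ("{} Multiplo(s) de 2, {} Multiplo(s) de 3, "
--             "{} Multiplo(s) de 4 e {} Multiplo(s) de 5").format(
--         counts[2], counts[3], counts[4], counts[5])
-- ===== Notes on version B (the rewrite author's own statement) =====
-- stated objective: alternative
-- what changed: Replaces the single pass maintaining four counters with four independent per-divisor counts (a dict comprehension of sum-of-generator scans) and one format call.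
import Mathlib
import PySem

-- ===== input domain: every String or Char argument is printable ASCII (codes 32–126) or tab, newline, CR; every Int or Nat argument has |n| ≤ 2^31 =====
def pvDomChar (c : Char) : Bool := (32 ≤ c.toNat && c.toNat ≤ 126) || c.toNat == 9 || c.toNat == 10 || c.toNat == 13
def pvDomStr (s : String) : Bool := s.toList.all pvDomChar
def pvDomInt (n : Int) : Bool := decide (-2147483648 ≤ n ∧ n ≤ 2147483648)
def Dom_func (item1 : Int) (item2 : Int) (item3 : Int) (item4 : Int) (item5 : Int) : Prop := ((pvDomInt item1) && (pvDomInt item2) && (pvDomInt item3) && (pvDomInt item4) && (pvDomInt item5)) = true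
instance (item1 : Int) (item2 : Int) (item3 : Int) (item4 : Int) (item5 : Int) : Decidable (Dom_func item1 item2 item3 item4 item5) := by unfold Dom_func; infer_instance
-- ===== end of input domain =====

-- B computes the four divisor counts independently (four scans) instead of one multi-branch pass; equal return value, no speed claim.
-- ===== PORT A =====
def funcLoop (l : List Int) (s : Int × Int × Int × Int) : Int × Int × Int × Int :=
  l.foldl (fun s y =>
    let s := if PySem.Int.mod y 2 = 0 then (s.1 + 1, s.2.1, s.2.2.1, s.2.2.2) else s
    let s := if PySem.Int.mod y 3 = 0 then (s.1, s.2.1 + 1, s.2.2.1, s.2.2.2) else s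
    let s := if PySem.Int.mod y 4 = 0 then (s.1, s.2.1, s.2.2.1 + 1, s.2.2.2) else s
    let s := if PySem.Int.mod y 5 = 0 then (s.1, s.2.1, s.2.2.1, s.2.2.2 + 1) else s
    s) s

def func (item1 : Int) (item2 : Int) (item3 : Int) (item4 : Int) (item5 : Int) : String :=
  let x := [item1, item2, item3, item4, item5]
  let m := funcLoop x (0, 0, 0, 0)
  PySem.Int.toStr m.1 ++ " Multiplo(s) de 2, " ++
  PySem.Int.toStr m.2.1 ++ " Multiplo(s) de 3, " ++
  PySem.Int.toStr m.2.2.1 ++ " Multiplo(s) de 4 e " ++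
  PySem.Int.toStr m.2.2.2 ++ " Multiplo(s) de 5"

-- ===== PORT B =====
def cntDiv (d : Int) (x : List Int) : Int :=
  ((x.filter (fun y => PySem.Int.mod y d == 0)).length : Int)

def func_alt (item1 : Int) (item2 : Int) (item3 : Int) (item4 : Int) (item5 : Int) : String :=
  let x := [item1, item2, item3, item4, item5]
  PySem.Int.toStr (cntDiv 2 x) ++ " Multiplo(s) de 2, " ++
  PySem.Int.toStr (cntDiv 3 x) ++ " Multiplo(s) de 3, " ++
  PySem.Int.toStr (cntDiv 4 x) ++ " Multiplo(s) de 4 e " ++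
  PySem.Int.toStr (cntDiv 5 x) ++ " Multiplo(s) de 5"

-- ===== PRECONDITION & SPEC =====
def Spec_func (item1 : Int) (item2 : Int) (item3 : Int) (item4 : Int) (item5 : Int) (out : String) : Prop := out = func_alt item1 item2 item3 item4 item5
instance (item1 : Int) (item2 : Int) (item3 : Int) (item4 : Int) (item5 : Int) (out : String) : Decidable (Spec_func item1 item2 item3 item4 item5 out) := by unfold Spec_func; infer_instance

-- ===== CLAIM (what is proved, stated in full; the proofs are below) =====
def Claim_equal_func : Prop := ∀ (item1 : Int) (item2 : Int) (item3 : Int) (item4 : Int) (item5 : Int), Dom_func item1 item2 item3 item4 item5 → Spec_func item1 item2 item3 item4 item5 (func item1 item2 item3 item4 item5)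

-- ===== LEMMAS AND PROOFS =====

theorem funcLoop_cons (y : Int) (t : List Int) (s : Int × Int × Int × Int) :
    funcLoop (y :: t) s = funcLoop t
      (let s := if PySem.Int.mod y 2 = 0 then (s.1 + 1, s.2.1, s.2.2.1, s.2.2.2) else s
       let s := if PySem.Int.mod y 3 = 0 then (s.1, s.2.1 + 1, s.2.2.1, s.2.2.2) else s
       let s := if PySem.Int.mod y 4 = 0 then (s.1, s.2.1, s.2.2.1 + 1, s.2.2.2) else s
       let s := if PySem.Int.mod y 5 = 0 then (s.1, s.2.1, s.2.2.1, s.2.2.2 + 1) else s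
       s) := rfl

theorem funcLoop_eq (l : List Int) (a b c d : Int) :
    funcLoop l (a, b, c, d) = (a + cntDiv 2 l, b + cntDiv 3 l, c + cntDiv 4 l, d + cntDiv 5 l) := by
  induction l generalizing a b c d with
  | nil => simp [funcLoop, cntDiv]
  | cons y t ih =>
    rw [funcLoop_cons]
    by_cases h2 : (2:Int) ∣ y <;> by_cases h3 : (3:Int) ∣ y <;>
      by_cases h4 : (4:Int) ∣ y <;> by_cases h5 : (5:Int) ∣ y <;>
      simp only [PySem.Int.mod_eq_zero_iff_dvd, h2, h3, h4, h5, if_pos, if_neg,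
        not_false_iff, ih] <;>
      simp [cntDiv, h2, h3, h4, h5, Prod.ext_iff] <;> omega

-- ===== VERDICT (by name: the statement is the Claim_ definition above) =====
theorem func_spec : Claim_equal_func := by
  intro i1 i2 i3 i4 i5 _
  unfold Spec_func func func_alt
  simp only [funcLoop_eq, zero_add]
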